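-- pv_equiv track=rewrite | github.com/bendobbins/Sudoku-Solver-Game | python-version/GUI.py | get_box_placement
-- ===== SOURCE A (Python) =====
-- BOXSIZE = 50
--
-- GAP = 4
--
-- SMALLGAP = 1
--
-- MARGIN = 25
--
-- def get_box_placement(x, y):
--     """
--     Finds and returns the window coordinates for box (x, y) in the grid.
--     """
--     left = MARGIN + GAP
--     for i in range(1, x + 1):
--         if i % 3 == 0:
--             left += BOXSIZE + GAP
--         else:
--             left += BOXSIZE + SMALLGAP
--
--     top = MARGIN + GAP
--     for i in range(1, y + 1):
--         if i % 3 == 0: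
--             top += BOXSIZE + GAP
--         else:
--             top += BOXSIZE + SMALLGAP
--
--     return left, top
-- ===== SOURCE B (Python) =====
-- BOXSIZE = 50
--
-- GAP = 4
--
-- SMALLGAP = 1
--
-- MARGIN = 25
--
-- def _coord(c):
--     n = c if c > 0 else 0
--     return MARGIN + GAP + n * (BOXSIZE + SMALLGAP) + (GAP - SMALLGAP) * (n // 3)
--
-- def get_box_placement(x, y):
--     """
--     Finds and returns the window coordinates for box (x, y) in the grid.
--     """
--     return _coord(x), _coord(y)
-- ===== Notes on version B (the rewrite author's own statement) =====
-- stated objective: simpler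
-- what changed: Replaced the two counting loops with a closed-form formula: coordinate = MARGIN+GAP + n*(BOXSIZE+SMALLGAP) + (GAP-SMALLGAP)*(n//3) for n = max(c,0), applied once per axis.
import Mathlib
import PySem

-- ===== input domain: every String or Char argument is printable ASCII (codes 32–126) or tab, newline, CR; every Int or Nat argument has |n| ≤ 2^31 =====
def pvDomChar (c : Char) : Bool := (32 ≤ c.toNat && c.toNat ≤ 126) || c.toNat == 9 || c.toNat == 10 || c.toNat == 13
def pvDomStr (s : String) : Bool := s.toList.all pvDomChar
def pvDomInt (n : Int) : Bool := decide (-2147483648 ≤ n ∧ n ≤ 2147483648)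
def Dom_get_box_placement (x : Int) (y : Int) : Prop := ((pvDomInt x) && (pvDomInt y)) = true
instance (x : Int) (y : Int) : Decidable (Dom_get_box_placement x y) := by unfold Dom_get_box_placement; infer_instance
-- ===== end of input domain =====

-- B replaces A's two counting loops by a closed-form formula per axis (simpler, O(1)).

def pvBOXSIZE : Int := 50
def pvGAP : Int := 4
def pvSMALLGAP : Int := 1
def pvMARGIN : Int := 25

-- ===== PORT A =====
def get_box_placement (x : Int) (y : Int) : Int × Int :=
  let left := (PySem.List.pyRange 1 (x + 1) 1).foldl
    (fun acc i => if PySem.Int.mod i 3 == 0 then acc + (pvBOXSIZE + pvGAP) else acc + (pvBOXSIZE + pvSMALLGAP))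
    (pvMARGIN + pvGAP)
  let top := (PySem.List.pyRange 1 (y + 1) 1).foldl
    (fun acc i => if PySem.Int.mod i 3 == 0 then acc + (pvBOXSIZE + pvGAP) else acc + (pvBOXSIZE + pvSMALLGAP))
    (pvMARGIN + pvGAP)
  (left, top)

-- ===== PORT B =====
def pvCoord (c : Int) : Int :=
  let n := if c > 0 then c else 0
  pvMARGIN + pvGAP + n * (pvBOXSIZE + pvSMALLGAP) + (pvGAP - pvSMALLGAP) * PySem.Int.floordiv n 3

def get_box_placement_alt (x : Int) (y : Int) : Int × Int :=
  (pvCoord x, pvCoord y)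

-- ===== PRECONDITION & SPEC =====
def Spec_get_box_placement (x : Int) (y : Int) (out : Int × Int) : Prop := out = get_box_placement_alt x y
instance (x : Int) (y : Int) (out : Int × Int) : Decidable (Spec_get_box_placement x y out) := by unfold Spec_get_box_placement; infer_instance

-- ===== CLAIM (what is proved, stated in full; the proofs are below) =====
def Claim_equal_get_box_placement : Prop := ∀ (x : Int) (y : Int), Dom_get_box_placement x y → Spec_get_box_placement x y (get_box_placement x y)

-- ===== LEMMAS AND PROOFS =====

-- the loop body, named for the proofs
def pvStep (acc i : Int) : Int :=
  if PySem.Int.mod i 3 == 0 then acc + (pvBOXSIZE + pvGAP) else acc + (pvBOXSIZE + pvSMALLGAP)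

theorem pvLoop_closed (n : Nat) :
    (PySem.List.pyRange 1 ((n : Int) + 1) 1).foldl pvStep (pvMARGIN + pvGAP)
      = pvMARGIN + pvGAP + (n : Int) * (pvBOXSIZE + pvSMALLGAP)
        + (pvGAP - pvSMALLGAP) * PySem.Int.floordiv (n : Int) 3 := by
  induction n with
  | zero =>
    rw [show ((0:Nat):Int) + 1 = 1 by norm_num, PySem.List.pyRange_one_eq_nil (by omega)]
    decide
  | succ m ih =>
    have h : (1 : Int) ≤ (m : Int) + 1 := by omega
    rw [show ((m + 1 : Nat) : Int) + 1 = ((m : Int) + 1) + 1 by push_cast; ring,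
        PySem.List.pyRange_one_succ_right h, List.foldl_append, ih]
    simp only [List.foldl, pvStep]
    have hfd : ∀ k : Nat, PySem.Int.floordiv (k : Int) 3 = ((k / 3 : Nat) : Int) := by
      intro k; exact_mod_cast PySem.Int.floordiv_natCast k 3
    have hmod : PySem.Int.mod ((m : Int) + 1) 3 = (((m + 1) % 3 : Nat) : Int) := by
      have := PySem.Int.mod_natCast (m + 1) 3
      push_cast at this ⊢
      omega
    rw [hmod, hfd m, hfd (m + 1)]
    have h3 : (m+1) % 3 = 0 ∨ (m+1) % 3 = 1 ∨ (m+1) % 3 = 2 := by omega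
    rcases h3 with h0 | h1 | h2
    · have : (m + 1) / 3 = m / 3 + 1 := by omega
      simp [h0, this, pvBOXSIZE, pvGAP, pvSMALLGAP, pvMARGIN]
      ring
    · have : (m + 1) / 3 = m / 3 := by omega
      simp [h1, this, pvBOXSIZE, pvGAP, pvSMALLGAP, pvMARGIN]
      ring
    · have : (m + 1) / 3 = m / 3 := by omega
      simp [h2, this, pvBOXSIZE, pvGAP, pvSMALLGAP, pvMARGIN]
      ring

theorem pvLoop_eq_coord (c : Int) :
    (PySem.List.pyRange 1 (c + 1) 1).foldl pvStep (pvMARGIN + pvGAP) = pvCoord c := by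
  by_cases hc : c ≤ 0
  · rw [PySem.List.pyRange_one_eq_nil (by omega)]
    simp only [List.foldl, pvCoord]
    rw [if_neg (by omega)]
    decide
  · obtain ⟨n, rfl⟩ : ∃ n : Nat, c = (n : Int) := ⟨c.toNat, by omega⟩
    rw [pvLoop_closed n]
    simp only [pvCoord]
    rw [if_pos (by omega : (n : Int) > 0)]

-- ===== VERDICT (by name: the statement is the Claim_ definition above) =====
theorem get_box_placement_spec : Claim_equal_get_box_placement := by
  intro x y _
  show _ = _
  unfold get_box_placement get_box_placement_alt
  simp only [show (fun (acc i : Int) => if PySem.Int.mod i 3 == 0 then acc + (pvBOXSIZE + pvGAP) else acc + (pvBOXSIZE + pvSMALLGAP)) = pvStep from rfl]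
  rw [pvLoop_eq_coord x, pvLoop_eq_coord y]
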